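-- pv_equiv track=rewrite | github.com/amyteq/tt_share | a09/P10hb_v4_a5.py | f_using_one
-- ===== SOURCE A (Python) =====
-- import math
-- import math
-- import math
-- import math, itertools, sys, sympy as sp
-- import math, itertools, sys, sympy as sp
--
-- def f_using_one(n):
--     S=n-1
--     min_lcm=10**12
--     for a in range(2,S-1):
--         b=S-a
--         if b<=1 or a==b: continue
--         l = (a*b)//math.gcd(a,b)
--         if l<min_lcm:
--             min_lcm=l
--     return min_lcm
-- ===== SOURCE B (Python) =====
-- import math
--
-- def f_using_one(n):
--     # min lcm(a,b) over a+b=S, a,b>=2, a!=b equals S - g where g is the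
--     # largest divisor of S whose cofactor is >= 3; found via trial division.
--     S = n - 1
--     if S <= 4:
--         return 10**12
--     d = 3
--     while d * d <= S:
--         if S % d == 0:
--             # d is the smallest divisor of S that is >= 3
--             return S - S // d
--         d += 1
--     # no divisor of S in [3, sqrt(S)]
--     if S % 2 == 0:
--         return S - 2          # best pair is (2, S-2), gcd 2
--     return 2 * (S - 2)        # S is an odd prime; best pair is (2, S-2), coprime
-- ===== Notes on version B (the rewrite author's own statement) =====
-- stated objective: faster
-- what changed: Replaces the O(n) scan over all splits a+b=n-1 with number theory: the minimal lcm is S minus the largest divisor of S=n-1 whose cofactor is at least three (or twice S minus four when S is an odd prime), found by O(sqrt(n)) trial division.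
import Mathlib
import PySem

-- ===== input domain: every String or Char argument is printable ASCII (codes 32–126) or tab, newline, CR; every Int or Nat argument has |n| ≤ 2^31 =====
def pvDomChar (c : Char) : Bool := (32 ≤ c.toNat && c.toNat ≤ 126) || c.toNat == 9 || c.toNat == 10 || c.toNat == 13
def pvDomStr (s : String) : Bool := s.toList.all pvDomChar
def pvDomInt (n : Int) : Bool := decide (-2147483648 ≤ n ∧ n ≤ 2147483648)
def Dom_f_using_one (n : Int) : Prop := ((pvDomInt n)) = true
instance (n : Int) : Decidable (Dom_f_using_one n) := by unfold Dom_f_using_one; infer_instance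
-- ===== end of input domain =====

-- B replaces A's linear scan over all splits a+b=n-1 by the closed form
-- "S minus the largest divisor of S with cofactor at least three", found by trial division.

-- ===== PORT A =====
def f_using_one (n : Int) : Int :=
  let S := n - 1
  (PySem.List.pyRange 2 (S - 1) 1).foldl
    (fun min_lcm a =>
      let b := S - a
      if b ≤ 1 ∨ a = b then min_lcm
      else
        let l := PySem.Int.floordiv (a * b) (Int.gcd a b)
        if l < min_lcm then l else min_lcm)
    (10 ^ 12)

-- ===== PORT B =====
-- helper: the `while d*d <= S` trial-division loop of Source B
def pvFindQ (S : Int) (d : Int) : Option Int :=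
  if h1 : d * d ≤ S then
    if h2 : PySem.Int.mod S d = 0 then some d
    else pvFindQ S (d + 1)
  else none
termination_by (S - d).toNat
decreasing_by
  have hd : d < S := by
    by_cases hp : 1 ≤ d
    · have hdd : d ≤ d * d := by nlinarith
      rcases lt_or_eq_of_le (le_trans hdd h1) with h | h
      · exact h
      · exfalso
        have : d ≤ 1 := by nlinarith
        have hd1 : d = 1 := le_antisymm this hp
        subst hd1
        exact h2 (by simp [PySem.Int.mod])
    · by_contra hns
      push_neg at hns
      have hS0 : S = 0 := by nlinarith [mul_self_nonneg d]
      have hd0 : d = 0 := by nlinarith [mul_self_nonneg d]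
      exact h2 (by simp [hS0, hd0, PySem.Int.mod])
  omega

def f_using_one_alt (n : Int) : Int :=
  let S := n - 1
  if S ≤ 4 then 10 ^ 12
  else
    match pvFindQ S 3 with
    | some d => S - PySem.Int.floordiv S d
    | none => if PySem.Int.mod S 2 = 0 then S - 2 else 2 * (S - 2)

-- ===== PRECONDITION & SPEC =====
def Spec_f_using_one (n : Int) (out : Int) : Prop := out = f_using_one_alt n
instance (n : Int) (out : Int) : Decidable (Spec_f_using_one n out) := by unfold Spec_f_using_one; infer_instance

-- ===== CLAIM (what is proved, stated in full; the proofs are below) =====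
def Claim_equal_f_using_one : Prop := ∀ (n : Int), Dom_f_using_one n → Spec_f_using_one n (f_using_one n)

-- ===== LEMMAS AND PROOFS =====

-- A's candidate value lcm(a, S-a) and A's loop body
def pvCand (S a : Int) : Int := PySem.Int.floordiv (a * (S - a)) (Int.gcd a (S - a))

def pvStep (S : Int) (m a : Int) : Int :=
  if S - a ≤ 1 ∨ a = S - a then m
  else if pvCand S a < m then pvCand S a else m

lemma f_using_one_eq_fold (n : Int) :
    f_using_one n = (PySem.List.pyRange 2 (n - 1 - 1) 1).foldl (pvStep (n - 1)) (10 ^ 12) := by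
  unfold f_using_one pvStep pvCand
  rfl

lemma pvStep_le (S m a : Int) : pvStep S m a ≤ m := by
  unfold pvStep
  split_ifs <;> omega

lemma pvStep_le_cand (S m a : Int) (hns : ¬ (S - a ≤ 1 ∨ a = S - a)) :
    pvStep S m a ≤ pvCand S a := by
  unfold pvStep
  rw [if_neg hns]
  split_ifs <;> omega

lemma fold_le_init (S : Int) (l : List Int) (init : Int) :
    l.foldl (pvStep S) init ≤ init := by
  induction l generalizing init with
  | nil => simp
  | cons a t ih => exact le_trans (ih (pvStep S init a)) (pvStep_le S init a)

lemma fold_le_mem (S : Int) (l : List Int) (init a : Int)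
    (ha : a ∈ l) (hns : ¬ (S - a ≤ 1 ∨ a = S - a)) :
    l.foldl (pvStep S) init ≤ pvCand S a := by
  obtain ⟨l1, l2, rfl⟩ := List.append_of_mem ha
  rw [List.foldl_append, List.foldl_cons]
  exact le_trans (fold_le_init S l2 _) (pvStep_le_cand S _ a hns)

lemma le_fold (S : Int) (l : List Int) (init t : Int)
    (hinit : t ≤ init)
    (hall : ∀ a ∈ l, ¬ (S - a ≤ 1 ∨ a = S - a) → t ≤ pvCand S a) :
    t ≤ l.foldl (pvStep S) init := by
  induction l generalizing init with
  | nil => simpa using hinit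
  | cons x tl ih =>
    apply ih
    · unfold pvStep
      split_ifs with hc hlt
      · exact hinit
      · exact hall x List.mem_cons_self hc
      · exact hinit
    · intro a ha hns; exact hall a (List.mem_cons_of_mem x ha) hns

-- the candidate at a divisor pair (g, S-g), cofactor q ≥ 3: lcm = S - g
lemma cand_at_divisor (S g q : Int) (hg : 0 < g) (hq : 3 ≤ q) (hgq : g * q = S) :
    pvCand S g = S - g := by
  have hb : S - g = g * (q - 1) := by rw [← hgq]; ring
  unfold pvCand
  rw [hb]
  have hgcd : Int.gcd g (g * (q - 1)) = g := by
    have h1 : Int.gcd g (g * (q - 1)) = Int.gcd (g * 1) (g * (q - 1)) := by ring_nf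
    rw [h1, Int.gcd_mul_left]
    simp [Int.gcd]
    omega
  rw [hgcd]
  rw [PySem.Int.floordiv_eq_ediv_of_pos (by omega)]
  have h2 : g * (g * (q - 1)) = (g * (q - 1)) * g := by ring
  rw [h2, Int.mul_ediv_cancel _ (by omega)]

-- structure of any admitted pair: its gcd g divides S with cofactor m ≥ 3, and cand ≥ S - g
lemma cand_structure (S a : Int) (h2a : 2 ≤ a) (h2b : 2 ≤ S - a) (hne : a ≠ S - a) :
    ∃ g m : Int, 0 < g ∧ g * m = S ∧ 3 ≤ m ∧ S - g ≤ pvCand S a ∧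
      (g = 1 → pvCand S a = a * (S - a)) := by
  set b := S - a with hb
  have hgpos : 0 < (Int.gcd a b : Int) := by
    have := Int.gcd_pos_of_ne_zero_left b (show a ≠ 0 by omega)
    exact_mod_cast this
  set g : Int := (Int.gcd a b : Int) with hgdef
  obtain ⟨x, hx⟩ : g ∣ a := Int.gcd_dvd_left a b
  obtain ⟨y, hy⟩ : g ∣ b := Int.gcd_dvd_right a b
  have hxpos : 1 ≤ x := by nlinarith
  have hypos : 1 ≤ y := by nlinarith
  have hcand : pvCand S a = g * (x * y) := by
    unfold pvCand
    rw [PySem.Int.floordiv_eq_ediv_of_pos hgpos]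
    rw [← hb, hx, hy]
    have h3 : g * x * (g * y) = (g * (x * y)) * g := by ring
    rw [h3, Int.mul_ediv_cancel _ (by omega)]
  have hsum : g * (x + y) = S := by rw [mul_add, ← hx, ← hy]; omega
  refine ⟨g, x + y, hgpos, hsum, ?_, ?_, ?_⟩
  · by_contra hm
    push_neg at hm
    have hx1 : x = 1 := by omega
    have hy1 : y = 1 := by omega
    apply hne; rw [hx, hy, hx1, hy1]
  · rw [hcand]
    nlinarith [mul_nonneg (mul_nonneg (le_of_lt hgpos) (by omega : (0:Int) ≤ x - 1)) (by omega : (0:Int) ≤ y - 1)]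
  · intro hg1
    rw [hcand, hg1, hx, hy, hg1]; ring

lemma mod_zero_iff (S d : Int) (hd : 0 < d) : PySem.Int.mod S d = 0 ↔ d ∣ S := by
  rw [PySem.Int.mod_eq_emod_of_pos hd]
  exact ⟨Int.dvd_of_emod_eq_zero, Int.emod_eq_zero_of_dvd⟩

-- pvFindQ invariants
lemma pvFindQ_some (k : Nat) : ∀ (S d q : Int), (S - d).toNat ≤ k → 3 ≤ d →
    (∀ e, 3 ≤ e → e < d → ¬ e ∣ S) → pvFindQ S d = some q →
    3 ≤ q ∧ q ∣ S ∧ q * q ≤ S ∧ ∀ e, 3 ≤ e → e < q → ¬ e ∣ S := by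
  induction k with
  | zero =>
    intro S d q hk hd hprev h
    rw [pvFindQ] at h
    split_ifs at h with h1 h2
    · cases h
      exact ⟨hd, (mod_zero_iff S d (by omega)).mp h2, h1, hprev⟩
    · exfalso
      have : d < S := by nlinarith
      omega
  | succ k ih =>
    intro S d q hk hd hprev h
    rw [pvFindQ] at h
    split_ifs at h with h1 h2
    · cases h
      exact ⟨hd, (mod_zero_iff S d (by omega)).mp h2, h1, hprev⟩
    · have hdS : d < S := by nlinarith
      have hnd : ¬ d ∣ S := fun hdvd => h2 ((mod_zero_iff S d (by omega)).mpr hdvd)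
      have hprev' : ∀ e, 3 ≤ e → e < d + 1 → ¬ e ∣ S := by
        intro e he helt
        rcases lt_or_eq_of_le (by omega : e ≤ d) with h' | h'
        · exact hprev e he h'
        · subst h'; exact hnd
      exact ih S (d + 1) q (by omega) (by omega) hprev' h

lemma pvFindQ_none (k : Nat) : ∀ (S d : Int), (S - d).toNat ≤ k → 3 ≤ d →
    pvFindQ S d = none → ∀ e, d ≤ e → e * e ≤ S → ¬ e ∣ S := by
  induction k with
  | zero =>
    intro S d hk hd h e hde hee
    rw [pvFindQ] at h
    split_ifs at h with h1 h2
    · exfalso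
      have : d < S := by nlinarith
      omega
    · intro _
      exact h1 (by nlinarith)
  | succ k ih =>
    intro S d hk hd h e hde hee
    rw [pvFindQ] at h
    split_ifs at h with h1 h2
    · have hdS : d < S := by nlinarith
      rcases lt_or_eq_of_le hde with h' | h'
      · exact ih S (d + 1) (by omega) (by omega) h e (by omega) hee
      · subst h'
        exact fun hdvd => h2 ((mod_zero_iff S d (by omega)).mpr hdvd)
    · intro _
      exact h1 (by nlinarith)

lemma dom_ub (n : Int) (hdom : Dom_f_using_one n) : n - 1 ≤ 2147483647 := by
  unfold Dom_f_using_one pvDomInt at hdom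
  simp only [decide_eq_true_eq] at hdom
  omega

-- main equivalence
lemma main_eq (n : Int) (hdom : Dom_f_using_one n) : f_using_one n = f_using_one_alt n := by
  rw [f_using_one_eq_fold]
  set S := n - 1 with hSdef
  have hub : S ≤ 2147483647 := dom_ub n hdom
  by_cases hS : S ≤ 4
  · -- degenerate: every a in the range is skipped, the fold keeps 10^12
    have halt : f_using_one_alt n = 10 ^ 12 := by
      unfold f_using_one_alt
      rw [← hSdef, if_pos hS]
    rw [halt]
    apply le_antisymm (fold_le_init _ _ _)
    apply le_fold
    · exact le_refl _
    · intro a ha hns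
      rw [PySem.List.mem_pyRange_one] at ha
      exfalso
      omega
  · push_neg at hS
    have hS5 : 5 ≤ S := by omega
    cases hq : pvFindQ S 3 with
    | some q =>
      obtain ⟨hq3, hqdvd, hqq, hmin⟩ :=
        pvFindQ_some (S - 3).toNat S 3 q (le_refl _) (by omega) (by omega) hq
      obtain ⟨c, hc⟩ := hqdvd
      have hqle : q * q ≤ q * c := by rw [← hc]; exact hqq
      have hqc : q ≤ c := le_of_mul_le_mul_left hqle (by omega)
      have hc3 : 3 ≤ c := by omega
      have h3c : 3 * c ≤ q * c := by nlinarith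
      have halt : f_using_one_alt n = S - c := by
        unfold f_using_one_alt
        rw [← hSdef, if_neg (by omega), hq]
        show S - PySem.Int.floordiv S q = S - c
        rw [PySem.Int.floordiv_eq_ediv_of_pos (by omega), hc,
          Int.mul_ediv_cancel_left _ (by omega)]
      rw [halt]
      have hcand : pvCand S c = S - c := cand_at_divisor S c q (by omega) hq3 (by rw [hc]; ring)
      have hmem : c ∈ PySem.List.pyRange 2 (S - 1) 1 := by
        rw [PySem.List.mem_pyRange_one]
        constructor
        · omega
        · linarith
      have hns : ¬ (S - c ≤ 1 ∨ c = S - c) := by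
        push_neg
        constructor
        · linarith
        · intro hcc; linarith
      apply le_antisymm
      · rw [← hcand]; exact fold_le_mem S _ _ c hmem hns
      · apply le_fold
        · linarith
        · intro a ha hna
          rw [PySem.List.mem_pyRange_one] at ha
          push_neg at hna
          obtain ⟨g, m, hg0, hgm, hm3, hge, _⟩ :=
            cand_structure S a (by omega) (by omega) (by omega)
          have hmdvd : m ∣ S := ⟨g, by rw [← hgm]; ring⟩
          have hqm : q ≤ m := by
            by_contra hlt
            exact hmin m hm3 (by omega) hmdvd
          have hqg : q * g ≤ q * c := by nlinarith
          have hgc : g ≤ c := le_of_mul_le_mul_left hqg (by omega)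
          linarith
    | none =>
      have hnone := pvFindQ_none (S - 3).toNat S 3 (le_refl _) (by omega) hq
      -- for every admitted pair the gcd is ≤ 2
      have hgcd2 : ∀ a, 2 ≤ a → a < S - 1 → S - a ≥ 2 → a ≠ S - a →
          ∃ g m : Int, 0 < g ∧ g ≤ 2 ∧ g * m = S ∧ S - g ≤ pvCand S a ∧
            (g = 1 → pvCand S a = a * (S - a)) := by
        intro a h1 h2 h3 h4
        obtain ⟨g, m, hg0, hgm, hm3, hge, hg1⟩ :=
          cand_structure S a (by omega) (by omega) h4
        refine ⟨g, m, hg0, ?_, hgm, hge, hg1⟩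
        by_contra hg3
        push_neg at hg3
        rcases le_total g m with hgle | hgle
        · exact hnone g (by omega) (by nlinarith) ⟨m, by rw [← hgm]⟩
        · exact hnone m (by omega) (by nlinarith) ⟨g, by rw [← hgm]; ring⟩
      by_cases hpar : PySem.Int.mod S 2 = 0
      · -- S even: answer S - 2 at the pair (2, S-2)
        obtain ⟨c, hc⟩ := (mod_zero_iff S 2 (by omega)).mp hpar
        have hc3 : 3 ≤ c := by omega
        have halt : f_using_one_alt n = S - 2 := by
          unfold f_using_one_alt
          rw [← hSdef, if_neg (by omega), hq]
          show (if PySem.Int.mod S 2 = 0 then S - 2 else 2 * (S - 2)) = S - 2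
          rw [if_pos hpar]
        rw [halt]
        have hcand : pvCand S 2 = S - 2 := cand_at_divisor S 2 c (by omega) hc3 (by omega)
        have hmem : (2 : Int) ∈ PySem.List.pyRange 2 (S - 1) 1 := by
          rw [PySem.List.mem_pyRange_one]; omega
        have hns : ¬ (S - 2 ≤ 1 ∨ (2 : Int) = S - 2) := by omega
        apply le_antisymm
        · rw [← hcand]; exact fold_le_mem S _ _ 2 hmem hns
        · apply le_fold
          · omega
          · intro a ha hna
            rw [PySem.List.mem_pyRange_one] at ha
            push_neg at hna
            obtain ⟨g, m, hg0, hg2, hgm, hge, _⟩ :=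
              hgcd2 a (by omega) (by omega) (by omega) (by omega)
            linarith
      · -- S odd: answer 2*(S-2) at the coprime pair (2, S-2)
        have hodd : ¬ (2 : Int) ∣ S := by
          intro hdvd
          exact hpar ((mod_zero_iff S 2 (by omega)).mpr hdvd)
        have halt : f_using_one_alt n = 2 * (S - 2) := by
          unfold f_using_one_alt
          rw [← hSdef, if_neg (by omega), hq]
          show (if PySem.Int.mod S 2 = 0 then S - 2 else 2 * (S - 2)) = 2 * (S - 2)
          rw [if_neg hpar]
        rw [halt]
        have hgcd1 : Int.gcd 2 (S - 2) = 1 := by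
          have hdl : ((Int.gcd 2 (S - 2) : Int)) ∣ 2 := Int.gcd_dvd_left 2 (S - 2)
          have hdr : ((Int.gcd 2 (S - 2) : Int)) ∣ (S - 2) := Int.gcd_dvd_right 2 (S - 2)
          have hle : ((Int.gcd 2 (S - 2) : Int)) ≤ 2 := Int.le_of_dvd (by omega) hdl
          have hpos : 0 < ((Int.gcd 2 (S - 2) : Int)) := by
            have := Int.gcd_pos_of_ne_zero_left (S - 2) (show (2:Int) ≠ 0 by omega)
            exact_mod_cast this
          have h12 : ((Int.gcd 2 (S - 2) : Int)) = 1 ∨ ((Int.gcd 2 (S - 2) : Int)) = 2 := by omega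
          rcases h12 with h | h
          · exact_mod_cast h
          · exfalso
            rw [h] at hdr
            exact hodd (by omega)
        have hcand : pvCand S 2 = 2 * (S - 2) := by
          unfold pvCand
          rw [hgcd1]
          simp [PySem.Int.floordiv]
        have hmem : (2 : Int) ∈ PySem.List.pyRange 2 (S - 1) 1 := by
          rw [PySem.List.mem_pyRange_one]; omega
        have hns : ¬ (S - 2 ≤ 1 ∨ (2 : Int) = S - 2) := by omega
        apply le_antisymm
        · rw [← hcand]; exact fold_le_mem S _ _ 2 hmem hns
        · apply le_fold
          · omega
          · intro a ha hna
            rw [PySem.List.mem_pyRange_one] at ha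
            push_neg at hna
            obtain ⟨g, m, hg0, hg2, hgm, hge, hg1⟩ :=
              hgcd2 a (by omega) (by omega) (by omega) (by omega)
            have hgone : g = 1 := by
              rcases (by omega : g = 1 ∨ g = 2) with h | h
              · exact h
              · exfalso; exact hodd ⟨m, by rw [← hgm, h]⟩
            rw [hg1 hgone]
            nlinarith

-- ===== VERDICT (by name: the statement is the Claim_ definition above) =====
theorem f_using_one_spec : Claim_equal_f_using_one := by
  intro n hdom
  exact main_eq n hdom
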